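-- pv_equiv track=rewrite | github.com/srz2/advent-of-code-2023 | 1/solution2.py | get_spelled_numbers
-- ===== SOURCE A (Python) =====
-- recognized_numbers = [
--                     {"name": "one", "value": 1},
--                     {"name": "two", "value": 2},
--                     {"name": "three", "value": 3},
--                     {"name": "four", "value": 4},
--                     {"name": "five", "value": 5},
--                     {"name": "six", "value": 6},
--                     {"name": "seven", "value": 7},
--                     {"name": "eight", "value": 8},
--                     {"name": "nine", "value": 9}]
--
-- def get_spelled_numbers(line: str):
--     spelled_numbers = []
--
--     for index in range(len(line)):
--         if line[index].isdigit():
--             continue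
--         for num_pair in recognized_numbers:
--             num = num_pair['name']
--             remaining_line = line[index:len(num) + index]
--             if remaining_line.startswith(num):
--                 spelled_numbers.append([str(num_pair['value']), index])
--
--     return spelled_numbers
-- ===== SOURCE B (Python) =====
-- recognized_numbers = [
--                     {"name": "one", "value": 1},
--                     {"name": "two", "value": 2},
--                     {"name": "three", "value": 3},
--                     {"name": "four", "value": 4},
--                     {"name": "five", "value": 5},
--                     {"name": "six", "value": 6},
--                     {"name": "seven", "value": 7},
--                     {"name": "eight", "value": 8},
--                     {"name": "nine", "value": 9}]
--
-- def _find_all(line, name, start):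
--     indices = []
--     while True:
--         i = line.find(name, start)
--         if i == -1:
--             break
--         indices.append(i)
--         start = i + 1
--     return indices
--
-- def get_spelled_numbers(line: str):
--     found = []
--     for num_pair in recognized_numbers:
--         for i in _find_all(line, num_pair['name'], 0):
--             found.append((i, num_pair['value']))
--     found.sort(key=lambda t: t[0])
--     return [[str(value), index] for index, value in found]
-- ===== Notes on version B (the rewrite author's own statement) =====
-- stated objective: faster
-- what changed: Word-major scanning: for each of the nine number words B repeatedly calls line.find(word, start) advancing the cursor by one to collect all (possibly overlapping) occurrence indices, then sorts the collected (index, value) pairs by index, instead of A's position-major per-character scan that slices and tests every word at every index; A's isdigit skip disappears because no number word starts with a digit.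
import Mathlib
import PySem

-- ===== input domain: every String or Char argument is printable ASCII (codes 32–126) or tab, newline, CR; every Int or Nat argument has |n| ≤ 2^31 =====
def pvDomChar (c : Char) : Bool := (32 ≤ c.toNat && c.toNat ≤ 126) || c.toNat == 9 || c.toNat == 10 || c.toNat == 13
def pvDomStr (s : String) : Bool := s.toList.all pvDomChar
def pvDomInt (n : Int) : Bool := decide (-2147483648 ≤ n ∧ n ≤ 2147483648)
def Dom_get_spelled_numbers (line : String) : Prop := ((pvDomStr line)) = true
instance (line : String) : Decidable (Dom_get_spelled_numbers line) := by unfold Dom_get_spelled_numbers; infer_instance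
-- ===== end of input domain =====

-- B re-implements A word-major: for each number word it collects all (overlapping) occurrence
-- indices with repeated find(word, start) calls, then sorts the pairs by index; same return value.

-- ===== PORT A =====
-- the module constant recognized_numbers: each dict {"name": w, "value": v} is ported as the pair (w, v)
def pvWords : List (String × Int) :=
  [("one", 1), ("two", 2), ("three", 3), ("four", 4), ("five", 5),
   ("six", 6), ("seven", 7), ("eight", 8), ("nine", 9)]

def get_spelled_numbers (line : String) : List (String × Int) :=
  (PySem.List.pyRange 0 (PySem.Str.len line) 1).foldl (fun acc index =>
    match PySem.Str.pyGet? line index with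
    | none => acc  -- unreachable: index ranges over range(len(line)), so line[index] never raises
    | some c =>
      if PySem.Str.isdigit c then acc  -- 'continue'
      else pvWords.foldl (fun acc2 p =>
        -- remaining_line = line[index:len(num) + index]
        if PySem.Str.startswith (PySem.Str.slice line (some index) (some (PySem.Str.len p.1 + index))) p.1
        then acc2 ++ [(PySem.Int.toStr p.2, index)] else acc2) acc) []

-- ===== PORT B =====
-- two facts about find used only to justify termination of the while-loop helper below
lemma pvFindFrom_gt (t w : List Char) (k : Nat) (hk : t.length < k) :
    PySem.Chars.findFrom t w (k : Int) none = -1 := by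
  simp [PySem.Chars.findFrom]; omega

lemma pvFindFrom_le (t w : List Char) (k : Nat) (hk : k ≤ t.length)
    (h : PySem.Chars.findFrom t w (k : Int) none ≠ -1) :
    k ≤ (PySem.Chars.findFrom t w (k : Int)).toNat ∧
      (PySem.Chars.findFrom t w (k : Int)).toNat ≤ t.length := by
  have hs := PySem.Chars.findFrom_natCast_spec t w k hk h
  have h2 := PySem.Chars.findFrom_natCast t w k hk
  have h3 := PySem.Chars.find_le_length (t.drop k) w
  rw [h2] at hs ⊢
  split at hs <;> split <;> simp_all <;> omega

-- _find_all(line, name, start): the while-loop collecting every i = line.find(name, start), start = i + 1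
def pvFindAll (line name : String) (start : Nat) : List Int :=
  let i := PySem.Str.findFrom line name (start : Int) none
  if _h : i = -1 then []
  else i :: pvFindAll line name (i.toNat + 1)
termination_by line.toList.length + 1 - start
decreasing_by
  simp only [PySem.Str.findFrom] at *
  by_cases hk : start ≤ line.toList.length
  · have := pvFindFrom_le line.toList name.toList start hk _h
    omega
  · exact absurd (pvFindFrom_gt line.toList name.toList start (by omega)) _h

def get_spelled_numbers_alt (line : String) : List (String × Int) :=
  let found : List (Int × Int) :=
    pvWords.foldl (fun acc p => acc ++ (pvFindAll line p.1 0).map (fun i => (i, p.2))) []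
  (PySem.List.sorted found (fun q => q.1)).map (fun q => (PySem.Int.toStr q.2, q.1))

-- ===== PRECONDITION & SPEC =====
def Spec_get_spelled_numbers (line : String) (out : List (String × Int)) : Prop := out = get_spelled_numbers_alt line
instance (line : String) (out : List (String × Int)) : Decidable (Spec_get_spelled_numbers line out) := by unfold Spec_get_spelled_numbers; infer_instance

-- ===== CLAIM (what is proved, stated in full; the proofs are below) =====
def Claim_equal_get_spelled_numbers : Prop := ∀ (line : String), Dom_get_spelled_numbers line → Spec_get_spelled_numbers line (get_spelled_numbers line)

-- ===== LEMMAS AND PROOFS =====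

-- 'word w matches t at position i'
def pvMatch (t : List Char) (i : Nat) (w : String) : Bool := decide (w.toList <+: t.drop i)

-- the grid of matches, position-major: the common normal form of both ports
def pvCanon (t : List Char) : List (Int × Int) :=
  (List.range t.length).flatMap
    (fun i => (pvWords.filter (fun p => pvMatch t i p.1)).map (fun p => ((i : Int), p.2)))

-- map-of-filter as filterMap
lemma pvFilterMap {α β : Type} (l : List α) (P : α → Bool) (g : α → β) :
    (l.filter P).map g = l.filterMap (fun x => if P x then some (g x) else none) := by
  induction l with
  | nil => rfl
  | cons x xs ih =>
    by_cases h : P x <;> simp [h, ih]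

-- transposing a grid of optional entries is a permutation
lemma pvFlatMapAppendPerm {α γ : Type} (ys : List α) (a b : α → List γ) :
    (ys.flatMap (fun y => a y ++ b y)).Perm (ys.flatMap a ++ ys.flatMap b) := by
  induction ys with
  | nil => simp
  | cons y ys ih =>
    simp only [List.flatMap_cons, List.append_assoc]
    exact ((ih.append_left (b y)).append_left (a y)).trans
      ((List.perm_append_comm_assoc (b y) (ys.flatMap a) (ys.flatMap b)).append_left (a y))

lemma pvTransposePerm {α β γ : Type} (xs : List α) (ys : List β) (f : α → β → Option γ) :
    (xs.flatMap (fun x => ys.filterMap (f x))).Perm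
      (ys.flatMap (fun y => xs.filterMap (fun x => f x y))) := by
  induction xs with
  | nil => simp
  | cons x xs ih =>
    have hrw : (fun y => (x :: xs).filterMap (fun x => f x y))
        = fun y => (f x y).toList ++ xs.filterMap (fun x => f x y) := by
      funext y
      rw [List.filterMap_eq_flatMap_toList, List.flatMap_cons, ← List.filterMap_eq_flatMap_toList]
    rw [List.flatMap_cons, hrw]
    have h2 : ys.flatMap (fun y => (f x y).toList) = ys.filterMap (f x) :=
      (List.filterMap_eq_flatMap_toList (f x) ys).symm
    refine List.Perm.trans (ih.append_left _) ?_
    rw [← h2]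
    exact (pvFlatMapAppendPerm ys _ _).symm

-- no two distinct number words are prefixes of each other (so at most one matches at a position)
lemma pvWordsNoPrefix :
    pvWords.Pairwise (fun p q => ¬ p.1.toList <+: q.1.toList ∧ ¬ q.1.toList <+: p.1.toList) := by
  decide

lemma pvFilterLenLeOne {α : Type} (l : List α) (P : α → Bool)
    (h : l.Pairwise (fun a b => ¬(P a = true ∧ P b = true))) : (l.filter P).length ≤ 1 := by
  induction l with
  | nil => simp
  | cons x xs ih =>
    rcases List.pairwise_cons.mp h with ⟨hx, hxs⟩
    by_cases hP : P x
    · have : xs.filter P = [] := by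
        rw [List.filter_eq_nil_iff]
        intro a ha hPa
        exact hx a ha ⟨hP, hPa⟩
      simp [hP, this]
    · simpa [List.filter_cons, hP] using ih hxs

lemma pvAtMostOne (t : List Char) (i : Nat) :
    (pvWords.filter (fun p => pvMatch t i p.1)).length ≤ 1 := by
  apply pvFilterLenLeOne
  apply pvWordsNoPrefix.imp
  intro p q hpq ⟨hp, hq⟩
  simp only [pvMatch, decide_eq_true_eq] at hp hq
  rcases List.prefix_or_prefix_of_prefix hp hq with h | h
  · exact hpq.1 h
  · exact hpq.2 h

-- a flatMap of singleton-or-empty groups keyed by a strictly increasing index is strictly sorted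
lemma pvPairwiseFlatMap (g : Nat → List (Int × Int))
    (hkey : ∀ i, ∀ x ∈ g i, x.1 = (i : Int)) (hlen : ∀ i, (g i).length ≤ 1) :
    ∀ (n s : Nat), ((List.range' s n).flatMap g).Pairwise (fun a b => a.1 < b.1) := by
  intro n
  induction n with
  | zero => simp
  | succ n ih =>
    intro s
    rw [List.range'_succ, List.flatMap_cons, List.pairwise_append]
    refine ⟨?_, ih (s + 1), ?_⟩
    · have := hlen s
      rcases hg : g s with _ | ⟨x, _ | ⟨y, l⟩⟩ <;> simp_all
    · intro a ha b hb
      rcases List.mem_flatMap.mp hb with ⟨j, hj, hbj⟩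
      rw [hkey s a ha, hkey j b hbj]
      have := (List.mem_range'_1.mp hj).1
      exact_mod_cast this

-- canon is strictly increasing in the index component
lemma pvCanonPairwise (t : List Char) : (pvCanon t).Pairwise (fun a b => a.1 < b.1) := by
  unfold pvCanon
  rw [List.range_eq_range']
  apply pvPairwiseFlatMap
  · intro i x hx
    rcases List.mem_map.mp hx with ⟨p, _, rfl⟩
    rfl
  · intro i
    rw [List.length_map]
    exact pvAtMostOne t i

-- A's slice+startswith test at index k is exactly 'w matches at k'
lemma pvCondEq (line : String) (k : Nat) (w : String) :
    PySem.Str.startswith (PySem.Str.slice line (some (k : Int)) (some (PySem.Str.len w + (k : Int)))) w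
      = pvMatch line.toList k w := by
  rw [PySem.Str.startswith_eq, PySem.Str.toList_slice, PySem.Str.len_eq, add_comm,
    PySem.Chars.slice_eq_listSlice, PySem.List.slice_natCast_add]
  apply Bool.eq_iff_iff.mpr
  rw [PySem.Chars.startswith_iff, pvMatch, decide_eq_true_iff, List.prefix_take_iff]
  simp

-- no number word starts with a digit, so A's isdigit skip never drops a match
lemma pvDigitNoMatch (t : List Char) (k : Nat) (hk : k < t.length)
    (hd : PySem.Str.isdigit t[k] = true) : ∀ p ∈ pvWords, pvMatch t k p.1 = false := by
  intro p hp
  rw [pvMatch, decide_eq_false_iff_not, List.drop_eq_getElem_cons hk]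
  fin_cases hp <;>
    · intro hpre
      have h0 := hpre.getElem (i := 0) (by decide)
      simp only [List.getElem_cons_zero] at h0
      rw [← h0] at hd
      exact absurd hd (by decide)

-- A computes canon (position-major)
lemma pvAeq (line : String) :
    get_spelled_numbers line = (pvCanon line.toList).map (fun q => (PySem.Int.toStr q.2, q.1)) := by
  unfold get_spelled_numbers pvCanon
  rw [PySem.Str.len_eq, PySem.List.pyRange_zero_nat, List.foldl_map, List.map_flatMap]
  rw [PySem.List.foldl_congr_mem (List.range line.toList.length) _
    (fun acc k => acc ++ ((pvWords.filter (fun p => pvMatch line.toList k p.1)).map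
      (fun p => (PySem.Int.toStr p.2, (k : Int)))) ) []
    ?_]
  · rw [PySem.List.foldl_append_eq_flatMap, List.nil_append]
    apply List.flatMap_congr
    intro k _
    rw [List.map_map]
    rfl
  · intro acc k hk
    have hk' : k < line.toList.length := by simpa using List.mem_range.mp hk
    have hget : PySem.Str.pyGet? line (k : Int) = some line.toList[k] := by
      simp [List.getElem?_eq_getElem hk']
    rw [hget]
    by_cases hd : PySem.Str.isdigit line.toList[k] = true
    · simp only [hd]
      have : pvWords.filter (fun p => pvMatch line.toList k p.1) = [] := by
        rw [List.filter_eq_nil_iff]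
        intro p hp
        simp [pvDigitNoMatch line.toList k hk' hd p hp]
      simp [this]
    · simp only [Bool.not_eq_true] at hd
      simp only [hd, Bool.false_eq_true, if_false]
      rw [PySem.List.foldl_congr_mem pvWords _
        (fun acc2 p => if pvMatch line.toList k p.1 then acc2 ++ [(PySem.Int.toStr p.2, (k : Int))] else acc2) acc
        (by intro acc2 p _; rw [pvCondEq])]
      rw [PySem.List.foldl_append_if]

-- the find-loop enumerates exactly the match positions of one word, in increasing order
lemma pvFindAllSpec (line name : String) :
    ∀ (fuel start : Nat), line.toList.length + 1 - start = fuel → start ≤ line.toList.length + 1 →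
    pvFindAll line name start =
      ((List.range' start (line.toList.length + 1 - start)).filter
          (fun i => pvMatch line.toList i name)).map (fun (i : Nat) => (i : Int)) := by
  intro fuel
  induction fuel using Nat.strong_induction_on with
  | _ fuel ih =>
  intro start hfuel hstart
  rw [pvFindAll]
  simp only [PySem.Str.findFrom]
  by_cases hend : line.toList.length + 1 = start
  · rw [dif_pos (pvFindFrom_gt line.toList name.toList start (by omega))]
    rw [show line.toList.length + 1 - start = 0 by omega]
    rfl
  · have hk : start ≤ line.toList.length := by omega
    by_cases hF : PySem.Chars.findFrom line.toList name.toList (start : Int) none = -1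
    · rw [dif_pos hF]
      have hno := (PySem.Chars.findFrom_natCast_eq_neg_one_iff line.toList name.toList start hk).mp hF
      rw [List.filter_eq_nil_iff.mpr ?_]
      · rfl
      · intro i hi hm
        apply hno
        rw [pvMatch, decide_eq_true_iff] at hm
        have hge : start ≤ i := (List.mem_range'_1.mp hi).1
        rw [show i = start + (i - start) by omega, ← List.drop_drop] at hm
        exact hm.isInfix.trans (List.drop_suffix _ _).isInfix
    · rw [dif_neg hF]
      have hnn : 0 ≤ PySem.Chars.find (line.toList.drop start) name.toList := by
        have h1 := PySem.Chars.neg_one_le_find (line.toList.drop start) name.toList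
        have h2 := PySem.Chars.findFrom_natCast line.toList name.toList start hk
        rw [h2] at hF
        split at hF
        · exact absurd rfl hF
        · omega
      set m : Nat := (PySem.Chars.find (line.toList.drop start) name.toList).toNat with hm
      have hFeq : PySem.Chars.findFrom line.toList name.toList (start : Int) none = ((start + m : Nat) : Int) := by
        rw [PySem.Chars.findFrom_natCast line.toList name.toList start hk]
        rw [if_neg (by omega)]
        push_cast [hm, Int.toNat_of_nonneg hnn]
        ring
      have hmle : m ≤ line.toList.length - start := by
        have := PySem.Chars.find_le_length (line.toList.drop start) name.toList
        rw [List.length_drop] at this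
        omega
      have hspec := PySem.Chars.find_spec hnn
      have hmatch : pvMatch line.toList (start + m) name = true := by
        rw [pvMatch, decide_eq_true_iff]
        have := hspec.1
        rwa [← hm, List.drop_drop] at this
      have hnomatch : ∀ j, start ≤ j → j < start + m → pvMatch line.toList j name = false := by
        intro j h1 h2
        rw [pvMatch, decide_eq_false_iff_not]
        have := hspec.2 (j - start) (by omega)
        rwa [List.drop_drop, show start + (j - start) = j by omega] at this
      rw [show line.toList.length + 1 - start = m + (line.toList.length + 1 - start - m) by omega]
      rw [← List.range'_append_1, List.filter_append]
      rw [List.filter_eq_nil_iff.mpr ?_]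
      · rw [List.nil_append]
        rw [show line.toList.length + 1 - start - m = (line.toList.length + 1 - (start + m + 1)) + 1 by omega]
        rw [List.range'_succ, List.filter_cons, if_pos hmatch]
        simp only [List.map_cons]
        rw [hFeq]
        have hrec := ih (line.toList.length + 1 - (start + m + 1)) (by omega) (start + m + 1) rfl (by omega)
        rw [show (((start + m : Nat) : Int)).toNat + 1 = start + m + 1 by omega, hrec]
      · intro i hi hmi
        have hb := List.mem_range'_1.mp hi
        rw [hnomatch i hb.1 (by omega)] at hmi
        exact absurd hmi (by decide)

-- B's pre-sort list is a permutation of canon, hence its sort IS canon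
lemma pvBeq (line : String) :
    get_spelled_numbers_alt line = (pvCanon line.toList).map (fun q => (PySem.Int.toStr q.2, q.1)) := by
  have hfound :
      pvWords.foldl (fun acc p => acc ++ (pvFindAll line p.1 0).map (fun i => (i, p.2))) []
        = pvWords.flatMap (fun p => (List.range line.toList.length).filterMap
            (fun i => if pvMatch line.toList i p.1 then some ((i : Int), p.2) else none)) := by
    rw [PySem.List.foldl_append_eq_flatMap, List.nil_append]
    apply List.flatMap_congr
    intro p hp
    rw [pvFindAllSpec line p.1 (line.toList.length + 1) 0 (by omega) (by omega), List.map_map]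
    rw [show line.toList.length + 1 - 0 = line.toList.length + 1 from rfl,
      ← List.range_eq_range', List.range_succ, List.filter_append]
    have hne : p.1.toList ≠ [] := by fin_cases hp <;> decide
    have hL : List.filter (fun i => pvMatch line.toList i p.1) [line.toList.length] = [] := by
      have hd : List.drop line.length line.toList = [] := by simp
      simp [pvMatch, hd, List.prefix_nil, hne]
    rw [hL, List.append_nil, pvFilterMap]
    rfl
  have hcanon : pvCanon line.toList = (List.range line.toList.length).flatMap
      (fun i => pvWords.filterMap
        (fun p => if pvMatch line.toList i p.1 then some ((i : Int), p.2) else none)) := by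
    unfold pvCanon
    apply List.flatMap_congr
    intro i _
    rw [pvFilterMap]
  simp only [get_spelled_numbers_alt]
  rw [hfound]
  rw [PySem.List.sorted_eq_of_perm_of_pairwise_lt _ (pvCanon line.toList) (fun q => q.1) ?_ ?_]
  · rw [hcanon]
    exact pvTransposePerm _ _ _
  · exact pvCanonPairwise line.toList

-- ===== VERDICT (by name: the statement is the Claim_ definition above) =====
theorem get_spelled_numbers_spec : Claim_equal_get_spelled_numbers := by
  intro line _
  unfold Spec_get_spelled_numbers
  rw [pvAeq, pvBeq]
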